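-- pv_equiv track=rewrite | github.com/csgear/codefights | interview/possibleSums.py | possibleSums2
-- ===== SOURCE A (Python) =====
-- def possibleSums2(coins, quantity):
--     maximum = sum((map(lambda t: t[0] * t[1], zip(coins, quantity))))
--
--     dp = [False] * (maximum + 1)
--
--     dp[0] = True
--
--     for coin,q in zip(coins,quantity):
--         for b in range(coin):
--             num = -1
--             for i in range(b,maximum+1,coin):
--                 if dp[i]:
--                     num = 0
--                 elif num>=0:
--                     num += 1
--                 dp[i] = (0 <= num <= q)
--
--     return (sum(dp) - 1)
-- ===== SOURCE B (Python) =====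
-- def possibleSums2(coins, quantity):
--     reachable = {0}
--     for coin, q in zip(coins, quantity):
--         reachable = {s + coin * k for s in reachable for k in range(q + 1)}
--     return len(reachable) - 1
-- ===== Notes on version B (the rewrite author's own statement) =====
-- stated objective: simpler
-- what changed: Replaces the residue-class sliding-window boolean DP over a size-(sum+1) array with direct enumeration of reachable sums in a set (for each coin, add every multiple up to its quantity to every reachable sum), returning len(set)-1.
-- outside the precondition, e.g. on possibleSums2([2, -1], [1, 1]): A returns 0, B returns 3; on possibleSums2([0], [-1]): A returns 0, B returns -1; on possibleSums2([2], [-2]): A raises IndexError, B returns -1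
import Mathlib
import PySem

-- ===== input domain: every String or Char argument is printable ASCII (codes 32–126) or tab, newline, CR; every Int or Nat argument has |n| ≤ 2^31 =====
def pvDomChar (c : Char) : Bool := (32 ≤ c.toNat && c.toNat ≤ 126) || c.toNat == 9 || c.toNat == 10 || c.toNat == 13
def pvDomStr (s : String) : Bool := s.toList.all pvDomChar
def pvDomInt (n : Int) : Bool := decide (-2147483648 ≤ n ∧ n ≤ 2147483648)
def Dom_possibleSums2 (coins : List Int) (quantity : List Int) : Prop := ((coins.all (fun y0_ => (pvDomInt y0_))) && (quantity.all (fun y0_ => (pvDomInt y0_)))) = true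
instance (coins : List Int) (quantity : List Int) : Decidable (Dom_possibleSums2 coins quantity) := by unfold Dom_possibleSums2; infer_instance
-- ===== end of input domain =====

-- B replaces A's residue-class sliding-window boolean DP with direct set enumeration of
-- reachable sums (objective: simpler); proved equal on Pre_ (no negative weighted total,
-- no negative coin with nonzero quantity, no zero coin with negative quantity).


-- ===== PORT A =====
-- Literal transliteration of A: maximum = Σ coin*quantity, boolean dp array of size
-- maximum+1, then for each (coin, q) a residue-class sliding window (the three nested
-- loops become the three nested folds pvStepA / pvChainA / pvInnerA over the same
-- state), return sum(dp) - 1.  dp[i] is PySem.List.pyGetD / pySetD (exact here: under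
-- Pre_ every index the loops touch lies in [0, maximum]).
def pvInnerA (q : Int) (s : List Bool × Int) (i : Int) : List Bool × Int :=
  let num := if PySem.List.pyGetD s.1 i false then (0 : Int)
             else if 0 ≤ s.2 then s.2 + 1 else s.2
  (PySem.List.pySetD s.1 i (decide (0 ≤ num ∧ num ≤ q)), num)

def pvChainA (maximum c q : Int) (dp : List Bool) (b : Int) : List Bool :=
  ((PySem.List.pyRange b (maximum + 1) c).foldl (pvInnerA q) (dp, -1)).1

def pvStepA (maximum : Int) (dp : List Bool) (cq : Int × Int) : List Bool :=
  (PySem.List.pyRange 0 cq.1 1).foldl (pvChainA maximum cq.1 cq.2) dp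

def possibleSums2 (coins : List Int) (quantity : List Int) : Int :=
  let maximum : Int := ((coins.zip quantity).map (fun t => t.1 * t.2)).foldl (· + ·) 0
  let dp : List Bool := List.replicate (maximum + 1).toNat false
  let dp := PySem.List.pySetD dp 0 true
  let dp := (coins.zip quantity).foldl (pvStepA maximum) dp
  (dp.foldl (fun a b => a + (if b then 1 else 0)) 0) - 1

-- ===== PORT B =====
-- Transliteration of Source B: reachable = {0}; per (coin, q) rebuild the set from every
-- reachable sum plus every multiple coin*k, k in range(q+1); return len(reachable) - 1.
def pvStepB (r : PySem.Set Int) (cq : Int × Int) : PySem.Set Int :=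
  r.foldl (fun acc s =>
      (PySem.List.pyRange 0 (cq.2 + 1) 1).foldl (fun acc k => PySem.Set.add acc (s + cq.1 * k)) acc)
    PySem.Set.empty

def possibleSums2_alt (coins : List Int) (quantity : List Int) : Int :=
  let reachable : PySem.Set Int := PySem.Set.ofList [0]
  let reachable := (coins.zip quantity).foldl pvStepB reachable
  PySem.Set.len reachable - 1

-- ===== PRECONDITION & SPEC =====
-- Pre_ excludes the inputs where A raises IndexError (negative weighted total) and those
-- where a negative coin with nonzero quantity or a zero coin with negative quantity makes
-- A's answer an artefact of `range(coin)` skipping negative coins while their products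
-- still shift/truncate the dp array, which B does not reproduce.
def Pre_possibleSums2 (coins : List Int) (quantity : List Int) : Prop :=
  (∀ p ∈ coins.zip quantity, (0 ≤ p.2 ∨ 0 < p.1) ∧ (0 ≤ p.1 ∨ p.2 = 0)) ∧
  0 ≤ ((coins.zip quantity).map (fun t => t.1 * t.2)).sum
instance (coins : List Int) (quantity : List Int) : Decidable (Pre_possibleSums2 coins quantity) := by
  unfold Pre_possibleSums2; infer_instance

def pvWitness_possibleSums2 : List Int × List Int := ([2, 3, 0], [2, 1, 5])

def Spec_possibleSums2 (coins : List Int) (quantity : List Int) (out : Int) : Prop := out = possibleSums2_alt coins quantity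
instance (coins : List Int) (quantity : List Int) (out : Int) : Decidable (Spec_possibleSums2 coins quantity out) := by unfold Spec_possibleSums2; infer_instance

-- ===== CLAIM (what is proved, stated in full; the proofs are below) =====
def Claim_equal_possibleSums2 : Prop := ∀ (coins : List Int) (quantity : List Int), Dom_possibleSums2 coins quantity → Pre_possibleSums2 coins quantity → Spec_possibleSums2 coins quantity (possibleSums2 coins quantity)

-- ===== LEMMAS AND PROOFS =====

-- The common mathematical object: the predicate transformer "one bounded coin".
def pvSP (c q : Int) (P : Int → Prop) (x : Int) : Prop :=
  ∃ y k : Int, P y ∧ 0 ≤ k ∧ k ≤ q ∧ x = y + c * k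

def pvFoldP (l : List (Int × Int)) (P : Int → Prop) : Int → Prop :=
  l.foldl (fun P p => pvSP p.1 p.2 P) P

def pvSum (l : List (Int × Int)) : Int := (l.map (fun t => t.1 * t.2)).sum

-- sliding-window condition on the old dp array
def pvW (dp : List Bool) (c q j : Int) : Prop :=
  ∃ k : Int, 0 ≤ k ∧ k ≤ q ∧ 0 ≤ j - k * c ∧ dp.getD (j - k * c).toNat false = true

-- invariant of A's `num` counter along one residue chain
def pvNumInv (dpin : List Bool) (b c : Int) (n : Nat) (num : Int) : Prop :=
  (num = -1 ∧ ∀ t : Nat, t < n → dpin.getD (b + c * t).toNat false = false) ∨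
  (∃ t0 : Nat, t0 < n ∧ num = (n : Int) - 1 - t0 ∧
    dpin.getD (b + c * t0).toNat false = true ∧
    ∀ t : Nat, t0 < t → t < n → dpin.getD (b + c * t).toNat false = false)

-- full invariant of the innermost fold after n chain positions
def pvCInv (dpin : List Bool) (b c q : Int) (n : Nat) (st : List Bool × Int) : Prop :=
  st.1.length = dpin.length ∧
  (∀ j : Int, 0 ≤ j → (∀ t : Nat, t < n → j ≠ b + c * t) →
      st.1.getD j.toNat false = dpin.getD j.toNat false) ∧
  (∀ t : Nat, t < n →
      (st.1.getD (b + c * t).toNat false = true ↔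
        ∃ k : Nat, k ≤ t ∧ (k : Int) ≤ q ∧ dpin.getD (b + c * ((t - k : Nat) : Int)).toNat false = true)) ∧
  pvNumInv dpin b c n st.2

lemma pv_foldl_add (l : List Int) (a : Int) : l.foldl (· + ·) a = a + l.sum := by
  induction l generalizing a with
  | nil => simp
  | cons x xs ih => simp [List.foldl_cons, ih]; ring

lemma pvSum_cons (p : Int × Int) (l : List (Int × Int)) : pvSum (p :: l) = p.1 * p.2 + pvSum l := by
  simp [pvSum]

lemma pvGood_mul (p : Int × Int) (h : (0 ≤ p.1 ∧ 0 ≤ p.2) ∨ (p.1 < 0 ∧ p.2 = 0)) :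
    0 ≤ p.1 * p.2 := by
  rcases h with ⟨h1, h2⟩ | ⟨_, h2⟩
  · exact mul_nonneg h1 h2
  · rw [h2]; simp

lemma pvSum_nonneg (l : List (Int × Int))
    (h : ∀ p ∈ l, (0 ≤ p.1 ∧ 0 ≤ p.2) ∨ (p.1 < 0 ∧ p.2 = 0)) : 0 ≤ pvSum l := by
  induction l with
  | nil => simp [pvSum]
  | cons p l ih =>
    have h1 := pvGood_mul p (h p (by simp))
    have h2 := ih (fun p hp => h p (by simp [hp]))
    rw [pvSum_cons]; omega

lemma pv_dvd_char (c b j : Int) (hc : 0 < c) (hb0 : 0 ≤ b) (hbc : b < c) (hj : 0 ≤ j) :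
    c ∣ j - b ↔ j % c = b := by
  constructor
  · rintro ⟨k, hk⟩
    have hj' : j = b + c * k := by omega
    have : (b + c * k) % c = b % c := by
      have := Int.add_mul_emod_self_left (a := b) (b := c) (c := k)
      simpa using this
    rw [hj', this, Int.emod_eq_of_lt hb0 hbc]
  · intro h
    have := Int.ediv_add_emod j c
    exact ⟨j / c, by omega⟩

lemma pv_chain_step (dpin : List Bool) (b c q M : Int) (n : Nat) (st : List Bool × Int)
    (hc : 0 < c) (hb : 0 ≤ b)
    (hmem : b + c * n ≤ M) (hlen : (dpin.length : Int) = M + 1)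
    (hinv : pvCInv dpin b c q n st) :
    pvCInv dpin b c q (n + 1) (pvInnerA q st (b + c * n)) := by
  obtain ⟨dp, num⟩ := st
  obtain ⟨L1, L2, L3, L4⟩ := hinv
  dsimp only at L1 L2 L3 L4
  have hgetset_ne : ∀ (l : List Bool) (a bi : Nat) (v : Bool), a ≠ bi →
      (l.set a v).getD bi false = l.getD bi false := by
    intro l a bi v h; simp [List.getD, List.getElem?_set_ne h]
  have hgetset_eq : ∀ (l : List Bool) (a : Nat) (v : Bool), a < l.length →
      (l.set a v).getD a false = v := by
    intro l a v h; simp [List.getD, List.getElem?_set_self h]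
  set i : Int := b + c * n with hidef
  have hcn : 0 ≤ c * (n : Int) := mul_nonneg hc.le (by positivity)
  have hi0 : 0 ≤ i := by omega
  have hitoNat : i.toNat < dp.length := by rw [L1]; omega
  have hfresh : ∀ t : Nat, t < n → i ≠ b + c * t := by
    intro t ht
    have : c * (t : Int) < c * (n : Int) :=
      mul_lt_mul_of_pos_left (by exact_mod_cast ht) hc
    omega
  have hne_toNat : ∀ t : Nat, t < n → (b + c * (t : Int)).toNat ≠ i.toNat := by
    intro t ht
    have h1 : (0 : Int) ≤ c * (t : Int) := mul_nonneg hc.le (by positivity)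
    have := hfresh t ht
    omega
  have hread : dp.getD i.toNat false = dpin.getD i.toNat false := L2 i hi0 hfresh
  -- unfold the loop body
  set num' : Int := if dpin.getD i.toNat false then (0 : Int)
                    else if 0 ≤ num then num + 1 else num with hnum'
  have hinner : pvInnerA q (dp, num) i =
      (dp.set i.toNat (decide (0 ≤ num' ∧ num' ≤ q)), num') := by
    simp only [pvInnerA, PySem.List.pyGetD_of_nonneg _ _ hi0,
      PySem.List.pySetD_of_nonneg _ _ hi0, hread, hnum']
  rw [hinner]
  refine ⟨by simpa using L1, ?_, ?_, ?_⟩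
  · -- untouched positions
    dsimp only
    intro j hj0 hjt
    have hji : j ≠ i := hjt n (by omega)
    have : j.toNat ≠ i.toNat := by omega
    rw [hgetset_ne _ _ _ _ (Ne.symm this)]
    exact L2 j hj0 (fun t ht => hjt t (by omega))
  · -- window characterisation at processed positions
    dsimp only
    intro t ht
    rcases Nat.lt_or_ge t n with htn | htn
    · rw [hgetset_ne _ _ _ _ (Ne.symm (hne_toNat t htn))]
      exact L3 t htn
    · have htn' : t = n := by omega
      subst htn'
      rw [show b + c * (t : Int) = i from rfl, hgetset_eq _ _ _ hitoNat]
      simp only [decide_eq_true_eq]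
      by_cases hdpi : dpin.getD i.toNat false = true
      · have hnum0 : num' = 0 := by rw [hnum', if_pos hdpi]
        by_cases hq0 : 0 ≤ q
        · constructor
          · intro _
            exact ⟨0, Nat.zero_le _, by exact_mod_cast hq0, by simpa using hdpi⟩
          · intro _; constructor <;> omega
        · constructor
          · intro h; omega
          · rintro ⟨k, hk, hkq, _⟩
            have : (0 : Int) ≤ (k : Int) := by positivity
            omega
      · have hdpi' : dpin.getD i.toNat false = false := by
          cases h : dpin.getD i.toNat false
          · rfl
          · exact absurd h hdpi
        rcases L4 with ⟨hm1, hall⟩ | ⟨t0, ht0n, hnumeq, ht0true, hafter⟩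
        · have hval : num' = -1 := by
            rw [hnum', if_neg hdpi, hm1]; norm_num
          constructor
          · intro h; omega
          · rintro ⟨k, hk, hkq, htrue⟩
            exfalso
            rcases Nat.eq_zero_or_pos k with hk0 | hkpos
            · subst hk0
              rw [Nat.sub_zero] at htrue
              have h0 : dpin.getD (b + c * (t : Int)).toNat false = false := hdpi'
              rw [h0] at htrue; simp at htrue
            · have h1 : t - k < t := by omega
              have := hall (t - k) h1
              rw [this] at htrue; simp at htrue
        · have hge : (0 : Int) ≤ num := by omega
          have hval : num' = (t : Int) - t0 := by
            rw [hnum', if_neg hdpi, if_pos hge, hnumeq]; ring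
          constructor
          · intro ⟨h1, h2⟩
            refine ⟨t - t0, by omega, ?_, ?_⟩
            · have : ((t - t0 : Nat) : Int) = (t : Int) - t0 := by omega
              omega
            · have : t - (t - t0) = t0 := by omega
              rw [this]; exact ht0true
          · rintro ⟨k, hk, hkq, htrue⟩
            have hkt : t - k ≠ t := by
              intro h
              have hk0 : k = 0 := by omega
              subst hk0
              rw [Nat.sub_zero] at htrue
              have h0 : dpin.getD (b + c * (t : Int)).toNat false = false := hdpi'
              rw [h0] at htrue; simp at htrue
            have hlt : t - k < t := by omega
            have hle : t - k ≤ t0 := by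
              by_contra hgt
              have := hafter (t - k) (by omega) (by omega)
              rw [this] at htrue; simp at htrue
            constructor
            · omega
            · omega
  · -- num invariant
    dsimp only [pvNumInv]
    by_cases hdpi : dpin.getD i.toNat false = true
    · right
      refine ⟨n, by omega, ?_, by simpa using hdpi, ?_⟩
      · rw [hnum', if_pos hdpi]; push_cast; ring
      · intro t h1 h2; omega
    · have hdpi' : dpin.getD i.toNat false = false := by
        cases h : dpin.getD i.toNat false
        · rfl
        · exact absurd h hdpi
      rcases L4 with ⟨hm1, hall⟩ | ⟨t0, ht0n, hnumeq, ht0true, hafter⟩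
      · left
        refine ⟨by rw [hnum', if_neg hdpi, hm1]; norm_num, ?_⟩
        intro t ht
        rcases Nat.lt_or_ge t n with h | h
        · exact hall t h
        · have : t = n := by omega
          subst this; exact hdpi'
      · right
        refine ⟨t0, by omega, ?_, ht0true, ?_⟩
        · rw [hnum', if_neg hdpi, if_pos (by omega : (0:Int) ≤ num), hnumeq]
          push_cast; ring
        · intro t h1 h2
          rcases Nat.lt_or_ge t n with h | h
          · exact hafter t h1 h
          · have : t = n := by omega
            subst this; exact hdpi'

lemma pv_chain_fold (dpin : List Bool) (b c q M : Int) (n : Nat)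
    (hc : 0 < c) (hb : 0 ≤ b)
    (hmem : ∀ t : Nat, t < n → b + c * t ≤ M) (hlen : (dpin.length : Int) = M + 1) :
    pvCInv dpin b c q n
      (((List.range n).map (fun t : Nat => b + c * (t : Int))).foldl (pvInnerA q) (dpin, -1)) := by
  induction n with
  | zero =>
    refine ⟨rfl, fun _ _ _ => rfl, fun t ht => absurd ht (by omega), Or.inl ⟨rfl, fun t ht => absurd ht (by omega)⟩⟩
  | succ n ih =>
    rw [List.range_succ, List.map_append, List.foldl_append]
    simp only [List.map_cons, List.map_nil, List.foldl_cons, List.foldl_nil]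
    exact pv_chain_step dpin b c q M n _ hc hb (hmem n (by omega)) hlen
      (ih (fun t ht => hmem t (by omega)))

lemma pv_chain (dpin : List Bool) (b c q M : Int)
    (hc : 0 < c) (hb : 0 ≤ b) (hbc : b < c)
    (hlen : (dpin.length : Int) = M + 1) :
    (pvChainA M c q dpin b).length = dpin.length ∧
    (∀ j : Int, 0 ≤ j → ¬(b ≤ j ∧ j ≤ M ∧ c ∣ j - b) →
        (pvChainA M c q dpin b).getD j.toNat false = dpin.getD j.toNat false) ∧
    (∀ j : Int, b ≤ j → j ≤ M → c ∣ j - b →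
        ((pvChainA M c q dpin b).getD j.toNat false = true ↔ pvW dpin c q j)) := by
  have hL : PySem.List.pyRange b (M + 1) c =
      (List.range (if b < M + 1 then ((M + 1 - b + c - 1) / c).toNat else 0)).map
        (fun t : Nat => b + c * (t : Int)) := PySem.List.pyRange_of_pos b (M + 1) hc
  set N : Nat := if b < M + 1 then ((M + 1 - b + c - 1) / c).toNat else 0 with hN
  have hmemL : ∀ x : Int, x ∈ PySem.List.pyRange b (M + 1) c ↔ b ≤ x ∧ x < M + 1 ∧ c ∣ x - b :=
    PySem.List.mem_pyRange_iff_of_pos hc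
  have hmem : ∀ t : Nat, t < N → b + c * t ≤ M := by
    intro t ht
    have hx : (b + c * t) ∈ PySem.List.pyRange b (M + 1) c := by
      rw [hL]; exact List.mem_map_of_mem (List.mem_range.mpr ht)
    have := (hmemL _).mp hx
    omega
  have hinv := pv_chain_fold dpin b c q M N hc hb hmem hlen
  obtain ⟨L1, L2, L3, _⟩ := hinv
  have hres : pvChainA M c q dpin b =
      (((List.range N).map (fun t : Nat => b + c * (t : Int))).foldl (pvInnerA q) (dpin, -1)).1 := by
    unfold pvChainA; rw [hL]
  refine ⟨by rw [hres]; exact L1, ?_, ?_⟩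
  · intro j hj0 hnot
    rw [hres]
    refine L2 j hj0 ?_
    intro t ht hjeq
    have h1 : 0 ≤ c * (t : Int) := mul_nonneg hc.le (by positivity)
    exact hnot ⟨by omega, by rw [hjeq]; exact hmem t ht, ⟨t, by omega⟩⟩
  · intro j hbj hjM hdvd
    have hjmem : j ∈ PySem.List.pyRange b (M + 1) c := (hmemL j).mpr ⟨hbj, by omega, hdvd⟩
    rw [hL] at hjmem
    obtain ⟨t, htN, hjeq⟩ := List.mem_map.mp hjmem
    have htN' : t < N := List.mem_range.mp htN
    subst hjeq
    rw [hres]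
    rw [L3 t htN']
    -- convert the Nat-window form to the Int-window form pvW
    unfold pvW
    constructor
    · rintro ⟨k, hkt, hkq, htrue⟩
      refine ⟨(k : Int), by positivity, hkq, ?_, ?_⟩
      · have h1 : ((t - k : Nat) : Int) = (t : Int) - k := by omega
        have h2 : 0 ≤ c * ((t : Int) - k) := mul_nonneg hc.le (by omega)
        have : b + c * (t : Int) - (k : Int) * c = b + c * ((t : Int) - (k : Int)) := by ring
        omega
      · have harg : (b + c * (t : Int) - (k : Int) * c) = b + c * ((t - k : Nat) : Int) := by
          have h1 : ((t - k : Nat) : Int) = (t : Int) - k := by omega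
          rw [h1]; ring
        rw [harg]; exact htrue
    · rintro ⟨k, hk0, hkq, hge, htrue⟩
      have hkt : k ≤ (t : Int) := by
        by_contra hgt
        have h1 : (t : Int) - k ≤ -1 := by omega
        have h2 : c * ((t : Int) - k) ≤ c * (-1) := mul_le_mul_of_nonneg_left h1 hc.le
        have h3 : b + c * (t : Int) - k * c = b + c * ((t : Int) - k) := by ring
        omega
      refine ⟨k.toNat, by omega, by omega, ?_⟩
      have harg : (b + c * ((t - k.toNat : Nat) : Int)) = b + c * (t : Int) - k * c := by
        have h1 : ((t - k.toNat : Nat) : Int) = (t : Int) - k := by omega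
        rw [h1]; ring
      rw [harg]; exact htrue

-- invariant over the residue loop
def pvRInv (dpin : List Bool) (c q M : Int) (B : Nat) (dp : List Bool) : Prop :=
  dp.length = dpin.length ∧
  ∀ j : Int, 0 ≤ j → j ≤ M →
    ((j % c < (B : Int) → (dp.getD j.toNat false = true ↔ pvW dpin c q j)) ∧
     ((B : Int) ≤ j % c → dp.getD j.toNat false = dpin.getD j.toNat false))

lemma pv_residue_step (dpin dp : List Bool) (c q M : Int) (B : Nat)
    (hc : 0 < c) (hB : (B : Int) < c) (hlen : (dpin.length : Int) = M + 1)
    (hinv : pvRInv dpin c q M B dp) :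
    pvRInv dpin c q M (B + 1) (pvChainA M c q dp (B : Int)) := by
  obtain ⟨hlendp, hinv'⟩ := hinv
  have hlendp' : (dp.length : Int) = M + 1 := by rw [hlendp]; exact hlen
  have hB0 : (0 : Int) ≤ (B : Int) := by positivity
  obtain ⟨C1, C2, C3⟩ := pv_chain dp (B : Int) c q M hc hB0 hB hlendp'
  have hmodsub : ∀ (j k : Int), (j - k * c) % c = j % c := by
    intro j k
    conv_rhs => rw [show j = (j - k * c) + c * k by ring]
    rw [Int.add_mul_emod_self_left]
  refine ⟨by rw [C1]; exact hlendp, ?_⟩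
  intro j hj0 hjM
  have hjmod0 : 0 ≤ j % c := Int.emod_nonneg j (ne_of_gt hc)
  have hjmodc : j % c < c := Int.emod_lt_of_pos j hc
  constructor
  · intro hlt
    push_cast at hlt
    rcases lt_or_eq_of_le (show j % c ≤ (B : Int) by omega) with hcase | hcase
    · -- residue already processed earlier: chain at B leaves it alone
      have huntouched : (pvChainA M c q dp (B : Int)).getD j.toNat false = dp.getD j.toNat false := by
        refine C2 j hj0 ?_
        rintro ⟨_, _, hdvd⟩
        rw [pv_dvd_char c (B : Int) j hc hB0 hB hj0] at hdvd
        omega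
      rw [huntouched]
      exact (hinv' j hj0 hjM).1 (by omega)
    · -- residue B: chain characterises it by the window over dp, = window over dpin
      have hBle : (B : Int) ≤ j := by
        have h1 := Int.ediv_add_emod j c
        have h2 : 0 ≤ j / c := Int.ediv_nonneg hj0 hc.le
        have h3 : 0 ≤ c * (j / c) := mul_nonneg hc.le h2
        omega
      have hdvd : c ∣ j - (B : Int) := by
        rw [pv_dvd_char c (B : Int) j hc hB0 hB hj0]; omega
      rw [C3 j hBle hjM hdvd]
      -- pvW dp ↔ pvW dpin : every window position is in residue B, untouched so far
      unfold pvW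
      constructor
      · rintro ⟨k, hk0, hkq, hge, htrue⟩
        refine ⟨k, hk0, hkq, hge, ?_⟩
        have hkc : 0 ≤ k * c := mul_nonneg hk0 hc.le
        have := (hinv' (j - k * c) (by omega) (by omega)).2 (by rw [hmodsub]; omega)
        rw [← this]; exact htrue
      · rintro ⟨k, hk0, hkq, hge, htrue⟩
        refine ⟨k, hk0, hkq, hge, ?_⟩
        have hkc : 0 ≤ k * c := mul_nonneg hk0 hc.le
        have := (hinv' (j - k * c) (by omega) (by omega)).2 (by rw [hmodsub]; omega)
        rw [this]; exact htrue
  · intro hge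
    push_cast at hge
    have huntouched : (pvChainA M c q dp (B : Int)).getD j.toNat false = dp.getD j.toNat false := by
      refine C2 j hj0 ?_
      rintro ⟨_, _, hdvd⟩
      rw [pv_dvd_char c (B : Int) j hc hB0 hB hj0] at hdvd
      omega
    rw [huntouched]
    exact (hinv' j hj0 hjM).2 (by omega)

lemma pv_residue_fold (dpin : List Bool) (c q M : Int) (B : Nat)
    (hc : 0 < c) (hB : (B : Int) ≤ c) (hlen : (dpin.length : Int) = M + 1) :
    pvRInv dpin c q M B
      (((List.range B).map (fun k : Nat => (0 : Int) + k)).foldl (pvChainA M c q) dpin) := by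
  induction B with
  | zero =>
    refine ⟨rfl, ?_⟩
    intro j hj0 hjM
    have := Int.emod_nonneg j (ne_of_gt hc)
    exact ⟨fun h => by push_cast at h; omega, fun _ => rfl⟩
  | succ B ih =>
    rw [List.range_succ, List.map_append, List.foldl_append]
    simp only [List.map_cons, List.map_nil, List.foldl_cons, List.foldl_nil]
    have hB' : ((B : Int)) < c := by push_cast at hB ⊢; omega
    have := pv_residue_step dpin _ c q M B hc hB' hlen (ih (by push_cast at hB ⊢; omega))
    simpa using this

lemma pv_stepA (M bound c q : Int) (P : Int → Prop) (dp : List Bool)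
    (hM : 0 ≤ M) (hgood : (0 ≤ c ∧ 0 ≤ q) ∨ (c < 0 ∧ q = 0))
    (hb0 : 0 ≤ bound) (hcap : bound + c * q ≤ M)
    (hlen : (dp.length : Int) = M + 1)
    (hinv : ∀ j : Int, 0 ≤ j → j ≤ M → (dp.getD j.toNat false = true ↔ P j))
    (hP : ∀ x, P x → 0 ≤ x ∧ x ≤ bound) :
    ((pvStepA M dp (c, q)).length : Int) = M + 1 ∧
    (∀ j : Int, 0 ≤ j → j ≤ M → ((pvStepA M dp (c, q)).getD j.toNat false = true ↔ pvSP c q P j)) ∧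
    (∀ x, pvSP c q P x → 0 ≤ x ∧ x ≤ bound + c * q) := by
  have hcq0 : 0 ≤ c * q := by
    rcases hgood with ⟨hc, hq⟩ | ⟨_, hq⟩
    · exact mul_nonneg hc hq
    · rw [hq]; simp
  have hboundM : bound ≤ M := by omega
  have hSPbnd : ∀ x, pvSP c q P x → 0 ≤ x ∧ x ≤ bound + c * q := by
    rintro x ⟨y, k, hy, hk0, hkq, rfl⟩
    have h1 := hP y hy
    rcases hgood with ⟨hc, hq⟩ | ⟨hc, hq⟩
    · have h2 : 0 ≤ c * k := mul_nonneg hc hk0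
      have h3 : c * k ≤ c * q := mul_le_mul_of_nonneg_left hkq hc
      omega
    · have hk : k = 0 := by omega
      rw [hk, mul_zero] at *
      omega
  rcases lt_trichotomy c 0 with hcneg | hczero | hcpos
  · -- c < 0: the residue loop body is empty, q = 0, and pvSP c 0 P = P
    have hq0 : q = 0 := by
      rcases hgood with ⟨hc, _⟩ | ⟨_, hq⟩
      · omega
      · exact hq
    subst hq0
    have hnil : PySem.List.pyRange 0 c 1 = [] := PySem.List.pyRange_one_eq_nil (by omega)
    have hfold : pvStepA M dp (c, 0) = dp := by
      unfold pvStepA; simp [hnil]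
    rw [hfold]
    refine ⟨hlen, ?_, hSPbnd⟩
    intro j hj0 hjM
    rw [hinv j hj0 hjM]
    unfold pvSP
    constructor
    · intro hPj; exact ⟨j, 0, hPj, le_refl 0, le_refl 0, by ring⟩
    · rintro ⟨y, k, hy, hk0, hkq, rfl⟩
      have hk : k = 0 := by omega
      rw [hk, mul_zero, add_zero]
      exact hy
  · -- c = 0: the residue loop body is empty, and pvSP 0 q P = P
    have hq0 : 0 ≤ q := by
      rcases hgood with ⟨_, hq⟩ | ⟨hc, _⟩
      · exact hq
      · omega
    subst hczero
    have hnil0 : PySem.List.pyRange 0 0 1 = [] := PySem.List.pyRange_one_eq_nil (le_refl 0)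
    have hfold : pvStepA M dp ((0 : Int), q) = dp := by
      unfold pvStepA; simp [hnil0]
    rw [hfold]
    refine ⟨hlen, ?_, hSPbnd⟩
    intro j hj0 hjM
    rw [hinv j hj0 hjM]
    unfold pvSP
    constructor
    · intro hPj; exact ⟨j, 0, hPj, le_refl 0, hq0, by ring⟩
    · rintro ⟨y, k, hy, _, _, rfl⟩
      simpa using hy
  · -- c > 0: the residue loop rewrites the whole array by the window condition
    have hrange : PySem.List.pyRange 0 c 1 =
        (List.range c.toNat).map (fun k : Nat => (0 : Int) + k) := by
      have := PySem.List.pyRange_one 0 c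
      simpa using this
    have hfold : pvStepA M dp (c, q) =
        ((List.range c.toNat).map (fun k : Nat => (0 : Int) + k)).foldl (pvChainA M c q) dp := by
      unfold pvStepA; rw [hrange]
    obtain ⟨R1, R2⟩ := pv_residue_fold dp c q M c.toNat hcpos (by omega) hlen
    rw [hfold]
    refine ⟨by rw [R1]; exact hlen, ?_, hSPbnd⟩
    intro j hj0 hjM
    have hmod : j % c < ((c.toNat : Nat) : Int) := by
      have := Int.emod_lt_of_pos j hcpos
      omega
    rw [(R2 j hj0 hjM).1 hmod]
    -- pvW dp c q j ↔ pvSP c q P j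
    unfold pvW pvSP
    constructor
    · rintro ⟨k, hk0, hkq, hge, htrue⟩
      have hkc : 0 ≤ k * c := mul_nonneg hk0 hcpos.le
      have hPy := (hinv (j - k * c) hge (by omega)).mp htrue
      exact ⟨j - k * c, k, hPy, hk0, hkq, by ring⟩
    · rintro ⟨y, k, hy, hk0, hkq, rfl⟩
      have h1 := hP y hy
      have h2 : 0 ≤ c * k := mul_nonneg hcpos.le hk0
      have harg : y + c * k - k * c = y := by ring
      refine ⟨k, hk0, hkq, by omega, ?_⟩
      rw [harg]
      exact (hinv y h1.1 (by omega)).mpr hy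

lemma pvA_main (l : List (Int × Int)) (M : Int) : ∀ (bound : Int) (dp : List Bool) (P : Int → Prop),
    0 ≤ M → 0 ≤ bound →
    (∀ p ∈ l, (0 ≤ p.1 ∧ 0 ≤ p.2) ∨ (p.1 < 0 ∧ p.2 = 0)) → bound + pvSum l ≤ M →
    (dp.length : Int) = M + 1 →
    (∀ j : Int, 0 ≤ j → j ≤ M → (dp.getD j.toNat false = true ↔ P j)) →
    (∀ x, P x → 0 ≤ x ∧ x ≤ bound) →
    ((l.foldl (pvStepA M) dp).length : Int) = M + 1 ∧
    (∀ j : Int, 0 ≤ j → j ≤ M →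
      ((l.foldl (pvStepA M) dp).getD j.toNat false = true ↔ pvFoldP l P j)) ∧
    (∀ x, pvFoldP l P x → 0 ≤ x ∧ x ≤ bound + pvSum l) := by
  induction l with
  | nil =>
    intro bound dp P hM hb0 _ _ hlen hinv hP
    refine ⟨hlen, ?_, ?_⟩
    · intro j hj0 hjM; exact hinv j hj0 hjM
    · intro x hx
      have := hP x hx
      simp only [pvSum, List.map_nil, List.sum_nil]
      omega
  | cons p ps ih =>
    intro bound dp P hM hb0 hpos hcap hlen hinv hP
    have hp := hpos p (by simp)
    have hps : ∀ r ∈ ps, (0 ≤ r.1 ∧ 0 ≤ r.2) ∨ (r.1 < 0 ∧ r.2 = 0) := fun r hr => hpos r (by simp [hr])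
    have hsums : 0 ≤ pvSum ps := pvSum_nonneg ps hps
    have hpp : 0 ≤ p.1 * p.2 := pvGood_mul p hp
    have hcap1 : bound + p.1 * p.2 ≤ M := by rw [pvSum_cons] at hcap; omega
    have hgood : (0 ≤ p.1 ∧ 0 ≤ p.2) ∨ (p.1 < 0 ∧ p.2 = 0) := hp
    obtain ⟨S1, S2, S3⟩ := pv_stepA M bound p.1 p.2 P dp hM hgood hb0 hcap1 hlen hinv hP
    rw [List.foldl_cons]
    have hstep : pvStepA M dp p = pvStepA M dp (p.1, p.2) := by rw [Prod.mk.eta]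
    rw [hstep]
    have hcap2 : (bound + p.1 * p.2) + pvSum ps ≤ M := by rw [pvSum_cons] at hcap; omega
    obtain ⟨T1, T2, T3⟩ := ih (bound + p.1 * p.2) (pvStepA M dp (p.1, p.2)) (pvSP p.1 p.2 P)
      hM (by omega) hps hcap2 S1 S2 S3
    refine ⟨T1, ?_, ?_⟩
    · intro j hj0 hjM
      rw [T2 j hj0 hjM]
      rfl
    · intro x hx
      have := T3 x hx
      rw [pvSum_cons]
      omega

-- B side
lemma pv_mem_foldl_update (l : List Int) (g : Int → List Int) :
    ∀ (init : PySem.Set Int) (x : Int),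
    (x ∈ l.foldl (fun acc s => PySem.Set.update acc (g s)) init ↔ x ∈ init ∨ ∃ s ∈ l, x ∈ g s) := by
  induction l with
  | nil => simp
  | cons y ys ih =>
    intro init x
    rw [List.foldl_cons, ih, PySem.Set.mem_update]
    constructor
    · rintro ((h | h) | ⟨s, hs, hgs⟩)
      · exact Or.inl h
      · exact Or.inr ⟨y, by simp, h⟩
      · exact Or.inr ⟨s, by simp [hs], hgs⟩
    · rintro (h | ⟨s, hs, hgs⟩)
      · exact Or.inl (Or.inl h)
      · rcases List.mem_cons.mp hs with h' | h'
        · exact Or.inl (Or.inr (h' ▸ hgs))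
        · exact Or.inr ⟨s, h', hgs⟩

lemma pv_nodup_foldl_update (l : List Int) (g : Int → List Int) :
    ∀ (init : PySem.Set Int), init.Nodup →
    (l.foldl (fun acc s => PySem.Set.update acc (g s)) init).Nodup := by
  induction l with
  | nil => intro init h; simpa using h
  | cons y ys ih =>
    intro init h
    rw [List.foldl_cons]
    exact ih _ (PySem.Set.nodup_update _ _ h)

lemma pv_stepB_eq (r : PySem.Set Int) (cq : Int × Int) :
    pvStepB r cq =
      r.foldl (fun acc s =>
        PySem.Set.update acc ((PySem.List.pyRange 0 (cq.2 + 1) 1).map (fun k => s + cq.1 * k)))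
        PySem.Set.empty := by
  unfold pvStepB
  congr 1
  funext acc s
  rw [PySem.Set.update_map_eq_foldl_add]

lemma pv_stepB_mem (r : PySem.Set Int) (cq : Int × Int) (x : Int) :
    x ∈ pvStepB r cq ↔ pvSP cq.1 cq.2 (fun y => y ∈ r) x := by
  rw [pv_stepB_eq, pv_mem_foldl_update]
  unfold pvSP
  simp only [PySem.Set.empty, List.not_mem_nil, false_or, List.mem_map,
    PySem.List.mem_pyRange_one]
  constructor
  · rintro ⟨s, hs, k, ⟨hk0, hk1⟩, rfl⟩
    exact ⟨s, k, hs, hk0, by omega, rfl⟩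
  · rintro ⟨y, k, hy, hk0, hk1, rfl⟩
    exact ⟨y, hy, k, ⟨hk0, by omega⟩, rfl⟩

lemma pv_stepB_nodup (r : PySem.Set Int) (cq : Int × Int) : (pvStepB r cq).Nodup := by
  rw [pv_stepB_eq]
  exact pv_nodup_foldl_update _ _ _ (by simp [PySem.Set.empty])

lemma pvB_main (l : List (Int × Int)) : ∀ (r : PySem.Set Int) (P : Int → Prop),
    r.Nodup → (∀ x, x ∈ r ↔ P x) →
    (l.foldl pvStepB r).Nodup ∧ ∀ x, x ∈ l.foldl pvStepB r ↔ pvFoldP l P x := by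
  induction l with
  | nil => intro r P h1 h2; exact ⟨h1, h2⟩
  | cons p ps ih =>
    intro r P h1 h2
    rw [List.foldl_cons]
    have hmem : ∀ x, x ∈ pvStepB r p ↔ pvSP p.1 p.2 P x := by
      intro x
      rw [pv_stepB_mem]
      unfold pvSP
      constructor
      · rintro ⟨y, k, hy, h⟩; exact ⟨y, k, (h2 y).mp hy, h⟩
      · rintro ⟨y, k, hy, h⟩; exact ⟨y, k, (h2 y).mpr hy, h⟩
    exact ih _ _ (pv_stepB_nodup r p) hmem

lemma pv_foldl_count (l : List Bool) : ∀ a : Int,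
    l.foldl (fun a b => a + (if b then 1 else 0)) a = a + (l.countP id : Int) := by
  induction l with
  | nil => simp
  | cons x xs ih =>
    intro a
    rw [List.foldl_cons, ih, List.countP_cons]
    cases x <;> simp <;> omega

-- ===== VERDICT (by name: the statement is the Claim_ definition above) =====
-- kill case: a coin > 0 with negative quantity empties everything in both programs
def pvAllFalse (dp : List Bool) : Prop := ∀ jn : Nat, dp.getD jn false = false

lemma pv_setfalse (dp : List Bool) (a : Nat) (h : pvAllFalse dp) : pvAllFalse (dp.set a false) := by
  intro jn
  by_cases hj : a = jn
  · subst hj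
    by_cases hlt : a < dp.length
    · simp [List.getD, List.getElem?_set_self hlt]
    · rw [List.set_eq_of_length_le (by omega)]; exact h a
  · simp only [List.getD, List.getElem?_set_ne hj]; exact h jn

lemma pv_allfalse_inner (q : Int) (L : List Int) (hL : ∀ i ∈ L, 0 ≤ i) :
    ∀ dp : List Bool, pvAllFalse dp →
    pvAllFalse ((L.foldl (pvInnerA q) (dp, -1)).1) ∧ (L.foldl (pvInnerA q) (dp, -1)).2 = -1 := by
  induction L with
  | nil => intro dp h; exact ⟨h, rfl⟩
  | cons i L ih =>
    intro dp h
    have hi0 : 0 ≤ i := hL i (by simp)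
    have hread : PySem.List.pyGetD dp i false = false := by
      rw [PySem.List.pyGetD_of_nonneg _ _ hi0]; exact h i.toNat
    have hstep : pvInnerA q (dp, -1) i = (dp.set i.toNat false, -1) := by
      simp [pvInnerA, hread, PySem.List.pySetD_of_nonneg _ _ hi0]
    rw [List.foldl_cons, hstep]
    exact ih (fun x hx => hL x (by simp [hx])) _ (pv_setfalse dp i.toNat h)

lemma pv_allfalse_chain (M c q b : Int) (hc : 0 < c) (hb : 0 ≤ b) (dp : List Bool)
    (h : pvAllFalse dp) : pvAllFalse (pvChainA M c q dp b) := by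
  unfold pvChainA
  refine (pv_allfalse_inner q _ ?_ dp h).1
  intro i hi
  have := (PySem.List.mem_pyRange_iff_of_pos hc i).mp hi
  omega

lemma pv_allfalse_stepA (M : Int) (cq : Int × Int) (dp : List Bool) (h : pvAllFalse dp) :
    pvAllFalse (pvStepA M dp cq) := by
  unfold pvStepA
  have haux : ∀ (bs : List Int), (∀ b ∈ bs, 0 ≤ b ∧ b < cq.1) →
      ∀ dp : List Bool, pvAllFalse dp → pvAllFalse (bs.foldl (pvChainA M cq.1 cq.2) dp) := by
    intro bs
    induction bs with
    | nil => intro _ dp h; exact h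
    | cons b bs ih =>
      intro hbs dp h
      have hb := hbs b (by simp)
      rw [List.foldl_cons]
      exact ih (fun x hx => hbs x (by simp [hx])) _
        (pv_allfalse_chain M cq.1 cq.2 b (by omega) hb.1 dp h)
  refine haux _ ?_ dp h
  intro b hb
  exact PySem.List.mem_pyRange_one.mp hb

lemma pv_len_inner (q : Int) (L : List Int) : ∀ st : List Bool × Int,
    ((L.foldl (pvInnerA q) st).1).length = st.1.length := by
  induction L with
  | nil => intro st; rfl
  | cons i L ih =>
    intro st
    rw [List.foldl_cons, ih]
    simp [pvInnerA, PySem.List.length_pySetD]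

lemma pv_len_stepA (M : Int) (cq : Int × Int) (dp : List Bool) :
    (pvStepA M dp cq).length = dp.length := by
  unfold pvStepA
  have haux : ∀ (bs : List Int) (dp : List Bool),
      (bs.foldl (pvChainA M cq.1 cq.2) dp).length = dp.length := by
    intro bs
    induction bs with
    | nil => intro dp; rfl
    | cons b bs ih =>
      intro dp
      rw [List.foldl_cons, ih]
      unfold pvChainA
      rw [pv_len_inner]
  exact haux _ dp

lemma pv_len_foldA (l : List (Int × Int)) (M : Int) : ∀ dp : List Bool,
    (l.foldl (pvStepA M) dp).length = dp.length := by
  induction l with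
  | nil => intro dp; rfl
  | cons p l ih => intro dp; rw [List.foldl_cons, ih, pv_len_stepA]

lemma pv_stepA_zero (M c q : Int) (dp : List Bool) (hc : 0 < c) (hq : q < 0)
    (hlen : (dp.length : Int) = M + 1) :
    pvAllFalse (pvStepA M dp (c, q)) := by
  have hrange : PySem.List.pyRange 0 c 1 =
      (List.range c.toNat).map (fun k : Nat => (0 : Int) + k) := by
    have := PySem.List.pyRange_one 0 c; simpa using this
  obtain ⟨R1, R2⟩ := pv_residue_fold dp c q M c.toNat hc (by omega) hlen
  have hfold : pvStepA M dp (c, q) =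
      ((List.range c.toNat).map (fun k : Nat => (0 : Int) + k)).foldl (pvChainA M c q) dp := by
    unfold pvStepA; rw [hrange]
  intro jn
  by_cases hjn : (jn : Int) ≤ M
  · have hW : ¬ pvW dp c q (jn : Int) := by
      rintro ⟨k, hk0, hkq, -, -⟩; omega
    have hmod : ((jn : Int)) % c < ((c.toNat : Nat) : Int) := by
      have := Int.emod_lt_of_pos (jn : Int) hc; omega
    have hiff := (R2 (jn : Int) (by positivity) hjn).1 hmod
    simp only [Int.toNat_natCast] at hiff
    rw [hfold]
    cases hv : (((List.range c.toNat).map (fun k : Nat => (0 : Int) + k)).foldl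
        (pvChainA M c q) dp).getD jn false
    · rfl
    · exact absurd (hiff.mp hv) hW
  · have hlen2 : (pvStepA M dp (c, q)).length = dp.length := pv_len_stepA M (c, q) dp
    have : (pvStepA M dp (c, q)).length ≤ jn := by omega
    simp [List.getD, List.getElem?_eq_none this]

lemma pv_countP_allfalse (dp : List Bool) (h : pvAllFalse dp) : dp.countP id = 0 := by
  rw [List.countP_eq_zero]
  intro a ha
  obtain ⟨n, hn, rfl⟩ := List.mem_iff_getElem.mp ha
  have hfa := h n
  simp only [List.getD, List.getElem?_eq_getElem hn, Option.getD_some] at hfa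
  simp [hfa]

lemma pv_foldl_id (r : List Int) : ∀ e : PySem.Set Int, r.foldl (fun acc _ => acc) e = e := by
  induction r with
  | nil => intro e; rfl
  | cons x r ih => intro e; rw [List.foldl_cons]; exact ih e

lemma pv_stepB_neg (r : PySem.Set Int) (cq : Int × Int) (hq : cq.2 < 0) :
    pvStepB r cq = PySem.Set.empty := by
  unfold pvStepB
  rw [PySem.List.pyRange_one_eq_nil (by omega : cq.2 + 1 ≤ 0)]
  simp only [List.foldl_nil]
  exact pv_foldl_id r _

lemma pv_stepB_empty_fold (l : List (Int × Int)) :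
    l.foldl pvStepB PySem.Set.empty = PySem.Set.empty := by
  induction l with
  | nil => rfl
  | cons p l ih =>
    rw [List.foldl_cons]
    have h : pvStepB PySem.Set.empty p = PySem.Set.empty := rfl
    rw [h, ih]

-- ===== VERDICT (by name: the statement is the Claim_ definition above) =====
theorem possibleSums2_spec : Claim_equal_possibleSums2 := by
  intro coins quantity _ hpre
  obtain ⟨hok, hsum⟩ := hpre
  unfold Spec_possibleSums2
  simp only [possibleSums2, possibleSums2_alt]
  set pairs := coins.zip quantity with hpairsdef
  set M : Int := (pairs.map fun t => t.1 * t.2).foldl (· + ·) 0 with hMdef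
  have hM : M = pvSum pairs := by rw [hMdef, pv_foldl_add]; simp [pvSum]
  have hM0 : 0 ≤ M := by rw [hM]; exact hsum
  set dp0 : List Bool := PySem.List.pySetD (List.replicate (M + 1).toNat false) 0 true with hdp0
  have hdp0' : dp0 = (List.replicate (M + 1).toNat false).set 0 true := by
    rw [hdp0, PySem.List.pySetD_of_nonneg _ _ (by norm_num : (0:Int) ≤ 0)]
    norm_num
  have hlen0 : ((dp0.length : Int)) = M + 1 := by
    rw [hdp0']; simp; omega
  by_cases hkill : ∃ p ∈ pairs, 0 < p.1 ∧ p.2 < 0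
  · -- some coin > 0 has a negative quantity: A's dp is wiped, B's set is emptied; both give -1
    obtain ⟨p, hpmem, hp1, hp2⟩ := hkill
    obtain ⟨l1, l2, hsplit⟩ := List.append_of_mem hpmem
    rw [hsplit]
    simp only [List.foldl_append, List.foldl_cons]
    have hlen1 : ((l1.foldl (pvStepA M) dp0).length : Int) = M + 1 := by
      rw [pv_len_foldA]; exact hlen0
    have haf2 : pvAllFalse (pvStepA M (l1.foldl (pvStepA M) dp0) p) := by
      have h := pv_stepA_zero M p.1 p.2 (l1.foldl (pvStepA M) dp0) hp1 hp2 hlen1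
      rwa [Prod.mk.eta] at h
    have haf3 : pvAllFalse (l2.foldl (pvStepA M) (pvStepA M (l1.foldl (pvStepA M) dp0) p)) := by
      have aux : ∀ (l : List (Int × Int)) (dp : List Bool), pvAllFalse dp →
          pvAllFalse (l.foldl (pvStepA M) dp) := by
        intro l
        induction l with
        | nil => intro dp h; exact h
        | cons r l ih => intro dp h; rw [List.foldl_cons]; exact ih _ (pv_allfalse_stepA M r dp h)
      exact aux l2 _ haf2
    rw [pv_foldl_count, pv_countP_allfalse _ haf3, pv_stepB_neg _ _ hp2, pv_stepB_empty_fold]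
    simp [PySem.Set.len, PySem.Set.empty]
  · -- every pair has a nonnegative coin and quantity (or a negative coin with quantity 0)
    push_neg at hkill
    have hpair : ∀ p ∈ pairs, (0 ≤ p.1 ∧ 0 ≤ p.2) ∨ (p.1 < 0 ∧ p.2 = 0) := by
      intro p hp
      have h1 := hok p hp
      have h2 := hkill p hp
      rcases lt_trichotomy p.1 0 with h | h | h
      · right; exact ⟨h, h1.2.resolve_left (by omega)⟩
      · left; refine ⟨by omega, ?_⟩
        rcases h1.1 with hq | hc
        · exact hq
        · omega
      · left; exact ⟨by omega, by have := h2 h; omega⟩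
    have hinv0 : ∀ j : Int, 0 ≤ j → j ≤ M → (dp0.getD j.toNat false = true ↔ j = 0) := by
      intro j hj0 hjM
      rw [hdp0']
      by_cases hj : j = 0
      · subst hj
        have hn : 0 < (M + 1).toNat := by omega
        simp [List.getD, List.getElem?_set_self, hn]
      · have hne : (0 : Nat) ≠ j.toNat := by omega
        simp only [List.getD, List.getElem?_set_ne hne, List.getElem?_replicate]
        split_ifs <;> simp [hj]
    obtain ⟨A1, A2, A3⟩ := pvA_main pairs M 0 dp0 (fun x => x = 0) hM0 (le_refl 0) hpair
      (by rw [← hM]; omega) hlen0 hinv0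
      (fun x hx => by rw [hx]; exact ⟨le_refl 0, le_refl 0⟩)
    have hr0 : (PySem.Set.ofList [(0 : Int)]).Nodup := PySem.Set.nodup_ofList _
    have hr0m : ∀ x : Int, x ∈ PySem.Set.ofList [(0 : Int)] ↔ x = 0 := by
      intro x; rw [PySem.Set.mem_ofList]; simp
    obtain ⟨B1, B2⟩ := pvB_main pairs (PySem.Set.ofList [(0 : Int)]) (fun x => x = 0) hr0 hr0m
    set dpA := pairs.foldl (pvStepA M) dp0 with hdpA
    set RB := pairs.foldl pvStepB (PySem.Set.ofList [(0 : Int)]) with hRB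
    rw [pv_foldl_count]
    have hcount : dpA.countP id = RB.length := by
      have hmap := PySem.List.map_pyGetD_pyRange_zero' dpA false
      have step1 : dpA.countP id =
          ((PySem.List.pyRange 0 (dpA.length : Int) 1).filter
            (fun j => PySem.List.pyGetD dpA j false)).length := by
        conv_lhs => rw [← hmap]
        rw [List.countP_map, ← List.countP_eq_length_filter]
        rfl
      have hperm : ((PySem.List.pyRange 0 (dpA.length : Int) 1).filter
          (fun j => PySem.List.pyGetD dpA j false)).Perm RB := by
        rw [List.perm_ext_iff_of_nodup (List.Nodup.filter _ (PySem.List.nodup_pyRange_one _ _)) B1]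
        intro x
        rw [List.mem_filter, PySem.List.mem_pyRange_one, B2]
        constructor
        · rintro ⟨⟨hx0, hxlt⟩, htrue⟩
          rw [PySem.List.pyGetD_of_nonneg _ _ hx0] at htrue
          exact (A2 x hx0 (by omega)).mp htrue
        · intro hx
          have hb := A3 x hx
          rw [← hM] at hb
          refine ⟨⟨hb.1, by omega⟩, ?_⟩
          rw [PySem.List.pyGetD_of_nonneg _ _ hb.1]
          exact (A2 x hb.1 (by omega)).mpr hx
      rw [step1, hperm.length_eq]
    rw [PySem.Set.len, ← hcount]
    omega
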